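-- pv_equiv track=rewrite | github.com/WIPACrepo/wipac-dev-py-setup-action | pyproject_toml_builder.py | get_development_status
-- ===== SOURCE A (Python) =====
-- SEMANTIC_RELEASE_MAJOR = ["[major]"]
--
-- SEMANTIC_RELEASE_MINOR = ["[minor]", "[feature]"]
--
-- SEMANTIC_RELEASE_PATCH = ["[patch]", "[fix]"]
--
-- DEV_STATUS_PREALPHA_0_0_0 = "Development Status :: 2 - Pre-Alpha"
--
-- DEV_STATUS_ALPHA_0_0_Z = "Development Status :: 3 - Alpha"
--
-- DEV_STATUS_BETA_0_Y_Z = "Development Status :: 4 - Beta"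
--
-- DEV_STATUS_PROD_X_Y_Z = "Development Status :: 5 - Production/Stable"
--
-- def get_development_status(
--     version: str,
--     patch_without_tag: bool,
--     commit_message: str,
-- ) -> str:
--     """Detect the development status from the package's version.
--
--     Known Statuses (**not all are supported**):
--         `"Development Status :: 1 - Planning"`
--         `"Development Status :: 2 - Pre-Alpha"`
--         `"Development Status :: 3 - Alpha"`
--         `"Development Status :: 4 - Beta"`
--         `"Development Status :: 5 - Production/Stable"`
--         `"Development Status :: 6 - Mature"`
--         `"Development Status :: 7 - Inactive"`
--     """
--
--     # detect version threshold crossing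
--     pending_major_bump = any(k in commit_message for k in SEMANTIC_RELEASE_MAJOR)
--     pending_minor_bump = any(k in commit_message for k in SEMANTIC_RELEASE_MINOR)
--     pending_patch_bump = patch_without_tag or any(
--         k in commit_message for k in SEMANTIC_RELEASE_PATCH
--     )
--
--     # NOTE - if someday we abandon python-semantic-release, this is a starting place to detect the next version -- in this case, we'd change the version number before merging to main
--
--     if version == "0.0.0":
--         if pending_major_bump:
--             return DEV_STATUS_PROD_X_Y_Z  # MAJOR-BUMPPING STRAIGHT TO PROD
--         elif pending_minor_bump:
--             return DEV_STATUS_BETA_0_Y_Z  # MINOR-BUMPPING STRAIGHT TO BETA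
--         elif pending_patch_bump:
--             return DEV_STATUS_ALPHA_0_0_Z  # PATCH-BUMPPING STRAIGHT TO ALPHA
--         else:
--             return DEV_STATUS_PREALPHA_0_0_0  # staying at pre-alpha
--
--     elif version.startswith("0.0."):
--         if pending_major_bump:
--             return DEV_STATUS_PROD_X_Y_Z  # MAJOR-BUMPPING STRAIGHT TO PROD
--         elif pending_minor_bump:
--             return DEV_STATUS_BETA_0_Y_Z  # MINOR-BUMPPING STRAIGHT TO BETA
--         else:
--             return DEV_STATUS_ALPHA_0_0_Z  # staying at alpha
--
--     elif version.startswith("0."):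
--         if pending_major_bump:
--             return DEV_STATUS_PROD_X_Y_Z  # MAJOR-BUMPPING STRAIGHT TO PROD
--         else:
--             return DEV_STATUS_BETA_0_Y_Z  # staying at beta
--
--     elif int(version.split(".")[0]) >= 1:
--         return DEV_STATUS_PROD_X_Y_Z
--
--     else:
--         raise Exception(f"Could not figure 'Development Status' for version: {version}")
-- ===== SOURCE B (Python) =====
-- SEMANTIC_RELEASE_MAJOR = ["[major]"]
-- SEMANTIC_RELEASE_MINOR = ["[minor]", "[feature]"]
-- SEMANTIC_RELEASE_PATCH = ["[patch]", "[fix]"]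
-- DEV_STATUS_PREALPHA_0_0_0 = "Development Status :: 2 - Pre-Alpha"
-- DEV_STATUS_ALPHA_0_0_Z = "Development Status :: 3 - Alpha"
-- DEV_STATUS_BETA_0_Y_Z = "Development Status :: 4 - Beta"
-- DEV_STATUS_PROD_X_Y_Z = "Development Status :: 5 - Production/Stable"
--
-- # status table indexed by [version tier][pending bump level]
-- _TABLE = [
--     [DEV_STATUS_PREALPHA_0_0_0, DEV_STATUS_ALPHA_0_0_Z, DEV_STATUS_BETA_0_Y_Z, DEV_STATUS_PROD_X_Y_Z],
--     [DEV_STATUS_ALPHA_0_0_Z, DEV_STATUS_ALPHA_0_0_Z, DEV_STATUS_BETA_0_Y_Z, DEV_STATUS_PROD_X_Y_Z],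
--     [DEV_STATUS_BETA_0_Y_Z, DEV_STATUS_BETA_0_Y_Z, DEV_STATUS_BETA_0_Y_Z, DEV_STATUS_PROD_X_Y_Z],
--     [DEV_STATUS_PROD_X_Y_Z] * 4,
-- ]
--
--
-- def _bump_level(patch_without_tag, commit_message):
--     if any(k in commit_message for k in SEMANTIC_RELEASE_MAJOR):
--         return 3
--     if any(k in commit_message for k in SEMANTIC_RELEASE_MINOR):
--         return 2
--     if patch_without_tag or any(k in commit_message for k in SEMANTIC_RELEASE_PATCH):
--         return 1
--     return 0
--
--
-- def _version_tier(version):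
--     if version == "0.0.0":
--         return 0
--     if version.startswith("0.0."):
--         return 1
--     if version.startswith("0."):
--         return 2
--     if int(version.split(".")[0]) >= 1:
--         return 3
--     raise Exception(f"Could not figure 'Development Status' for version: {version}")
--
--
-- def get_development_status(
--     version: str,
--     patch_without_tag: bool,
--     commit_message: str,
-- ) -> str:
--     return _TABLE[_version_tier(version)][_bump_level(patch_without_tag, commit_message)]
-- ===== Notes on version B (the rewrite author's own statement) =====
-- stated objective: simpler
-- what changed: Replaces the nested if/elif cascade with two small classifiers (version tier 0-3, pending bump level 0-3) and a single lookup in a precomputed 4x4 status table.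
import Mathlib
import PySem

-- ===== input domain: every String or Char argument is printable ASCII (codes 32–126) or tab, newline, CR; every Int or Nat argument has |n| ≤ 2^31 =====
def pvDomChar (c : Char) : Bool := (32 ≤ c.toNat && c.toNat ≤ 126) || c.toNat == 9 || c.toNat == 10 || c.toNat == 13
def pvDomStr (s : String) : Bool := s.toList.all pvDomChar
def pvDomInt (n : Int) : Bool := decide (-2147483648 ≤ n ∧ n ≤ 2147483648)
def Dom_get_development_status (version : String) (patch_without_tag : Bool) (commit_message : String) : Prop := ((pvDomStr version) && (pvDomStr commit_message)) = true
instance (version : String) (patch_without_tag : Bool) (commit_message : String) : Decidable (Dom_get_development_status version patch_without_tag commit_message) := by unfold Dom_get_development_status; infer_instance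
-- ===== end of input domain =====

-- B replaces A's nested if/elif cascade by a (version tier, bump level) classification
-- and one lookup in a precomputed 4×4 table; equivalence of return values is proved on
-- Pre_ (the inputs where A returns; on the rest both Pythons raise the same Exception).

-- ===== PORT A =====
def SEMANTIC_RELEASE_MAJOR : List String := ["[major]"]
def SEMANTIC_RELEASE_MINOR : List String := ["[minor]", "[feature]"]
def SEMANTIC_RELEASE_PATCH : List String := ["[patch]", "[fix]"]
def DEV_STATUS_PREALPHA_0_0_0 : String := "Development Status :: 2 - Pre-Alpha"
def DEV_STATUS_ALPHA_0_0_Z : String := "Development Status :: 3 - Alpha"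
def DEV_STATUS_BETA_0_Y_Z : String := "Development Status :: 4 - Beta"
def DEV_STATUS_PROD_X_Y_Z : String := "Development Status :: 5 - Production/Stable"

def get_development_status (version : String) (patch_without_tag : Bool) (commit_message : String) : String :=
  let pending_major_bump := SEMANTIC_RELEASE_MAJOR.any (fun k => PySem.Str.isIn k commit_message)
  let pending_minor_bump := SEMANTIC_RELEASE_MINOR.any (fun k => PySem.Str.isIn k commit_message)
  let pending_patch_bump := patch_without_tag || SEMANTIC_RELEASE_PATCH.any (fun k => PySem.Str.isIn k commit_message)
  if version == "0.0.0" then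
    if pending_major_bump then DEV_STATUS_PROD_X_Y_Z
    else if pending_minor_bump then DEV_STATUS_BETA_0_Y_Z
    else if pending_patch_bump then DEV_STATUS_ALPHA_0_0_Z
    else DEV_STATUS_PREALPHA_0_0_0
  else if PySem.Str.startswith version "0.0." then
    if pending_major_bump then DEV_STATUS_PROD_X_Y_Z
    else if pending_minor_bump then DEV_STATUS_BETA_0_Y_Z
    else DEV_STATUS_ALPHA_0_0_Z
  else if PySem.Str.startswith version "0." then
    if pending_major_bump then DEV_STATUS_PROD_X_Y_Z
    else DEV_STATUS_BETA_0_Y_Z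
  else
    match PySem.Int.ofStr? (((PySem.Str.split? version ".").getD []).headD "") with
    | some n => if 1 ≤ n then DEV_STATUS_PROD_X_Y_Z else ""  -- raise Exception → outside Pre_
    | none => ""  -- int() ValueError → outside Pre_

-- ===== PORT B =====
def pvTable : List (List String) :=
  [[DEV_STATUS_PREALPHA_0_0_0, DEV_STATUS_ALPHA_0_0_Z, DEV_STATUS_BETA_0_Y_Z, DEV_STATUS_PROD_X_Y_Z],
   [DEV_STATUS_ALPHA_0_0_Z, DEV_STATUS_ALPHA_0_0_Z, DEV_STATUS_BETA_0_Y_Z, DEV_STATUS_PROD_X_Y_Z],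
   [DEV_STATUS_BETA_0_Y_Z, DEV_STATUS_BETA_0_Y_Z, DEV_STATUS_BETA_0_Y_Z, DEV_STATUS_PROD_X_Y_Z],
   [DEV_STATUS_PROD_X_Y_Z, DEV_STATUS_PROD_X_Y_Z, DEV_STATUS_PROD_X_Y_Z, DEV_STATUS_PROD_X_Y_Z]]

def pvBumpLevel (patch_without_tag : Bool) (commit_message : String) : Nat :=
  if SEMANTIC_RELEASE_MAJOR.any (fun k => PySem.Str.isIn k commit_message) then 3
  else if SEMANTIC_RELEASE_MINOR.any (fun k => PySem.Str.isIn k commit_message) then 2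
  else if patch_without_tag || SEMANTIC_RELEASE_PATCH.any (fun k => PySem.Str.isIn k commit_message) then 1
  else 0

-- none = the Python raises (outside Pre_)
def pvVersionTier (version : String) : Option Nat :=
  if version == "0.0.0" then some 0
  else if PySem.Str.startswith version "0.0." then some 1
  else if PySem.Str.startswith version "0." then some 2
  else
    match PySem.Int.ofStr? (((PySem.Str.split? version ".").getD []).headD "") with
    | some n => if 1 ≤ n then some 3 else none
    | none => none

def get_development_status_alt (version : String) (patch_without_tag : Bool) (commit_message : String) : String :=
  match pvVersionTier version with
  | some t => (pvTable.getD t []).getD (pvBumpLevel patch_without_tag commit_message) ""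
  | none => ""  -- raise Exception → outside Pre_

-- ===== PRECONDITION & SPEC =====
-- Pre_ excludes exactly the inputs where A raises: version not "0.0.0", not starting with
-- "0.", and whose first '.'-component either fails int() (ValueError) or parses < 1 (Exception).
def Pre_get_development_status (version : String) (patch_without_tag : Bool) (commit_message : String) : Prop :=
  version = "0.0.0" ∨ PySem.Str.startswith version "0." = true ∨
    ((PySem.Int.ofStr? (((PySem.Str.split? version ".").getD []).headD "")).any (fun n => decide (1 ≤ n)) = true)
instance (version : String) (patch_without_tag : Bool) (commit_message : String) : Decidable (Pre_get_development_status version patch_without_tag commit_message) := by unfold Pre_get_development_status; infer_instance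

def pvWitness_get_development_status : String × Bool × String := ("0.3.1", true, "[minor] add thing")

def Spec_get_development_status (version : String) (patch_without_tag : Bool) (commit_message : String) (out : String) : Prop := out = get_development_status_alt version patch_without_tag commit_message
instance (version : String) (patch_without_tag : Bool) (commit_message : String) (out : String) : Decidable (Spec_get_development_status version patch_without_tag commit_message out) := by unfold Spec_get_development_status; infer_instance

-- ===== CLAIM (what is proved, stated in full; the proofs are below) =====
def Claim_equal_get_development_status : Prop := ∀ (version : String) (patch_without_tag : Bool) (commit_message : String), Dom_get_development_status version patch_without_tag commit_message → Pre_get_development_status version patch_without_tag commit_message → Spec_get_development_status version patch_without_tag commit_message (get_development_status version patch_without_tag commit_message)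

-- ===== LEMMAS AND PROOFS =====

-- ===== VERDICT (by name: the statement is the Claim_ definition above) =====
theorem get_development_status_spec : Claim_equal_get_development_status := by
  intro version patch_without_tag commit_message _ hpre
  unfold Spec_get_development_status get_development_status get_development_status_alt pvVersionTier pvBumpLevel pvTable
  by_cases h0 : version == "0.0.0"
  · simp only [h0, if_true]
    split_ifs <;> rfl
  · simp only [h0, Bool.false_eq_true, if_false]
    by_cases h1 : PySem.Str.startswith version "0.0." = true
    · simp only [h1, if_true]
      split_ifs <;> rfl
    · simp only [h1, if_false]
      by_cases h2 : PySem.Str.startswith version "0." = true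
      · simp only [h2, if_true]
        split_ifs <;> rfl
      · simp only [h2, if_false]
        rcases hpre with h | h | h
        · exact absurd (by simp [h]) h0
        · exact absurd h h2
        · rcases ho : PySem.Int.ofStr? (((PySem.Str.split? version ".").getD []).headD "") with _ | n
          · rw [ho] at h; simp at h
          · rw [ho] at h
            simp only [Option.any_some, decide_eq_true_eq] at h
            simp only [ho, h, if_true]
            split_ifs <;> rfl
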